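-- pv_equiv track=rewrite | github.com/muhammed-saeed/LLMpedia | evaluation/capture_trap.py | _resolve_titles
-- ===== SOURCE A (Python) =====
-- from typing import Any, Dict, List, Optional, Tuple
--
-- def _resolve_titles(requested_titles: List[str], query_obj: Dict[str, Any]) -> Dict[str, str]:
--     mapping = {t: t for t in requested_titles}
--     for item in query_obj.get("normalized", []):
--         mapping[item["from"]] = item["to"]
--     changed = True
--     while changed:
--         changed = False
--         for item in query_obj.get("redirects", []):
--             src, dst = item["from"], item["to"]
--             for k, v in list(mapping.items()):
--                 if v == src:
--                     mapping[k] = dst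
--                     changed = True
--     return mapping
-- ===== SOURCE B (Python) =====
-- def _resolve_titles(requested_titles, query_obj):
--     mapping = {t: t for t in requested_titles}
--     for item in query_obj.get("normalized", []):
--         mapping[item["from"]] = item["to"]
--     edges = [(item["from"], item["to"]) for item in query_obj.get("redirects", [])]
--     srcs = {s for s, _ in edges}
--
--     def _follow(v):
--         # one bounded chain walk per value: each step applies the whole edge
--         # list once; a terminating chain leaves srcs within len(edges) steps
--         for _ in range(len(edges) + 1):
--             if v not in srcs:
--                 break
--             for s, d in edges:
--                 if v == s:
--                     v = d
--         return v
--
--     cache = {}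
--     result = {}
--     for k, v in mapping.items():
--         if v not in cache:
--             cache[v] = _follow(v)
--         result[k] = cache[v]
--     return result
-- ===== Notes on version B (the rewrite author's own statement) =====
-- stated objective: alternative
-- what changed: A repeatedly sweeps every redirect over every mapping entry until a whole pass changes nothing; B builds the edge list once and resolves each distinct mapping value by one bounded chain walk (at most len(edges)+1 passes over the edges), cached per value, so the global fixpoint iteration disappears.
import Mathlib
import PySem

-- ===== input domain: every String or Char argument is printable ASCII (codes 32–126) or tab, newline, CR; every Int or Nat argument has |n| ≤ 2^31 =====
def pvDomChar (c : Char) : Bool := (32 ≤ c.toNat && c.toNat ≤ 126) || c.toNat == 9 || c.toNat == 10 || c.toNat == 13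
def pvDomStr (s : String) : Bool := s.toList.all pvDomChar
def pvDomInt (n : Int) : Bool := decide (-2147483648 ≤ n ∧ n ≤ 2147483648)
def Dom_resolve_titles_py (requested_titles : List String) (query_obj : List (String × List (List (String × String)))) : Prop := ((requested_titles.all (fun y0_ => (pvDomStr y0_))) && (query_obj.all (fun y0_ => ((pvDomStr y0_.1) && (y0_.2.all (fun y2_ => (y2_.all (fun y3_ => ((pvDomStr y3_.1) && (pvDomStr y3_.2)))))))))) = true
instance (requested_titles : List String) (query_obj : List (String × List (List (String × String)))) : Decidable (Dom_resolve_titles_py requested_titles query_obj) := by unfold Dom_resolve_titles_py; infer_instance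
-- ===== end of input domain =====

-- B replaces A's repeated global sweeps over the whole mapping (rescan every entry
-- for every redirect until a pass changes nothing) by one bounded chain walk per
-- distinct mapping value, cached in a dict; objective: alternative.

-- ===== PORT A =====
-- shared helper: item["from"] / item["to"] on an item dict.  Under Pre_ the key is
-- present, so the `getD ""` default is never taken (Python raises KeyError there).
def pvItemGet (item : List (String × String)) (k : String) : String :=
  ((PySem.Dict.mk item).get? k).getD ""

-- mapping = {t: t for t in requested}; then mapping[item["from"]] = item["to"]
-- for the "normalized" items (identical first phase in A and B).
def pvInitMap (requested : List String) (normalized : List (List (String × String))) :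
    PySem.Dict String String :=
  normalized.foldl (fun m item => m.insert (pvItemGet item "from") (pvItemGet item "to"))
    (requested.foldl (fun m t => m.insert t t) PySem.Dict.empty)

-- inner loop 'for k, v in list(mapping.items()): if v == src: mapping[k] = dst':
-- mapping keys are distinct (it is a dict), so overwriting key k replaces that
-- entry in place; the snapshot-rebuild fold below is exactly that update.
def aScan (m : List (String × String)) (changed : Bool) (src dst : String) :
    List (String × String) × Bool :=
  m.foldl
    (fun st kv => if kv.2 == src then (st.1 ++ [(kv.1, dst)], true) else (st.1 ++ [kv], st.2))
    ([], changed)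

-- 'for item in redirects: src, dst = item["from"], item["to"]; <inner loop>'
def aBody (redirects : List (List (String × String)))
    (st : List (String × String) × Bool) : List (String × String) × Bool :=
  redirects.foldl
    (fun st item => aScan st.1 st.2 (pvItemGet item "from") (pvItemGet item "to")) st

-- 'changed = True; while changed: changed = False; <body>'.  The while loop has no
-- Python bound; under Pre_ it makes at most length redirects + 1 passes, so the
-- fuel length redirects + 2 is never exhausted there.
def aLoop (redirects : List (List (String × String))) :
    Nat → List (String × String) → List (String × String)
  | 0, m => m
  | n + 1, m =>
    let st := aBody redirects (m, false)
    if st.2 then aLoop redirects n st.1 else st.1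

def resolve_titles_py (requested_titles : List String)
    (query_obj : List (String × List (List (String × String)))) : List (String × String) :=
  let normalized := ((PySem.Dict.mk query_obj).get? "normalized").getD []
  let redirects := ((PySem.Dict.mk query_obj).get? "redirects").getD []
  aLoop redirects (redirects.length + 2) (pvInitMap requested_titles normalized).items

-- ===== PORT B =====
-- edges = [(item["from"], item["to"]) for item in query_obj.get("redirects", [])]
def pvEdges (redirects : List (List (String × String))) : List (String × String) :=
  redirects.map (fun item => (pvItemGet item "from", pvItemGet item "to"))

-- 'for s, d in edges: if v == s: v = d'  (one full pass of the edge list over v)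
def pvPass (edges : List (String × String)) (v : String) : String :=
  edges.foldl (fun w sd => if w == sd.1 then sd.2 else w) v

-- _follow(v): bounded chain walk — 'for _ in range(len(edges)+1): if v not in
-- srcs: break; <pass>'
def bFollow (edges : List (String × String)) (srcs : PySem.Set String) :
    Nat → String → String
  | 0, v => v
  | n + 1, v => if srcs.contains v then bFollow edges srcs n (pvPass edges v) else v

def resolve_titles_py_alt (requested_titles : List String)
    (query_obj : List (String × List (List (String × String)))) : List (String × String) :=
  let mapping := pvInitMap requested_titles (((PySem.Dict.mk query_obj).get? "normalized").getD [])
  let edges := pvEdges (((PySem.Dict.mk query_obj).get? "redirects").getD [])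
  let srcs : PySem.Set String := PySem.Set.ofList (edges.map Prod.fst)
  -- 'for k, v in mapping.items(): if v not in cache: cache[v] = _follow(v); result[k] = cache[v]'
  (mapping.items.foldl
    (fun (st : PySem.Dict String String × PySem.Dict String String) kv =>
      let cache := if (st.1.get? kv.2).isSome then st.1
                   else st.1.insert kv.2 (bFollow edges srcs (edges.length + 1) kv.2)
      (cache, st.2.insert kv.1 (cache.getD kv.2 "")))
    (PySem.Dict.empty, PySem.Dict.empty)).2.items

-- ===== PRECONDITION & SPEC =====
-- Pre_ excludes exactly (a) inputs where some "normalized"/"redirects" item lacks a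
-- "from" or "to" key — A raises KeyError there — and (b) inputs where some initial
-- mapping value never leaves the redirect sources, i.e. A's while loop never
-- terminates.  The bounded iterate of the one-step redirect map pvPass is a closed
-- condition on the input, not a run of either port.
def Pre_resolve_titles_py (requested_titles : List String)
    (query_obj : List (String × List (List (String × String)))) : Prop :=
  (∀ item ∈ ((PySem.Dict.mk query_obj).get? "normalized").getD [] ++
            ((PySem.Dict.mk query_obj).get? "redirects").getD [],
      ((PySem.Dict.mk item).get? "from").isSome ∧ ((PySem.Dict.mk item).get? "to").isSome) ∧
  (∀ v ∈ (pvInitMap requested_titles (((PySem.Dict.mk query_obj).get? "normalized").getD [])).values,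
      (pvPass (pvEdges (((PySem.Dict.mk query_obj).get? "redirects").getD [])))^[(pvEdges (((PySem.Dict.mk query_obj).get? "redirects").getD [])).length + 1] v
        ∉ (pvEdges (((PySem.Dict.mk query_obj).get? "redirects").getD [])).map Prod.fst)

instance (requested_titles : List String) (query_obj : List (String × List (List (String × String)))) : Decidable (Pre_resolve_titles_py requested_titles query_obj) := by unfold Pre_resolve_titles_py; infer_instance

def pvWitness_resolve_titles_py : List String × (List (String × List (List (String × String)))) :=
  (["a", "b"], [("normalized", [[("from", "b"), ("to", "c")]]),
                ("redirects", [[("from", "c"), ("to", "d")], [("from", "a"), ("to", "c")]])])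

def Spec_resolve_titles_py (requested_titles : List String) (query_obj : List (String × List (List (String × String)))) (out : List (String × String)) : Prop := out = resolve_titles_py_alt requested_titles query_obj
instance (requested_titles : List String) (query_obj : List (String × List (List (String × String)))) (out : List (String × String)) : Decidable (Spec_resolve_titles_py requested_titles query_obj out) := by unfold Spec_resolve_titles_py; infer_instance

-- ===== CLAIM (what is proved, stated in full; the proofs are below) =====
def Claim_equal_resolve_titles_py : Prop := ∀ (requested_titles : List String) (query_obj : List (String × List (List (String × String)))), Dom_resolve_titles_py requested_titles query_obj → Pre_resolve_titles_py requested_titles query_obj → Spec_resolve_titles_py requested_titles query_obj (resolve_titles_py requested_titles query_obj)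

-- ===== LEMMAS AND PROOFS =====

-- the effect of one redirect (s, d) on one mapping entry
def pvG (s d : String) (kv : String × String) : String × String :=
  if kv.2 == s then (kv.1, d) else kv

theorem pvPass_cons (s d : String) (e : List (String × String)) (v : String) :
    pvPass ((s, d) :: e) v = pvPass e (if v == s then d else v) := rfl

theorem pvPass_escaped (edges : List (String × String)) (v : String)
    (h : v ∉ edges.map Prod.fst) : pvPass edges v = v := by
  induction edges with
  | nil => rfl
  | cons sd e ih =>
    simp only [List.map_cons, List.mem_cons, not_or] at h
    rw [pvPass_cons]
    have : (v == sd.1) = false := by simpa using h.1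
    rw [this]
    simp only [Bool.false_eq_true, if_false]
    exact ih h.2

theorem pvAnyOr (l : List (String × String)) (p q : (String × String) → Bool) :
    (l.any p || l.any q) = l.any (fun x => p x || q x) := by
  induction l with
  | nil => simp
  | cons a t ih =>
    simp only [List.any_cons, ← ih]
    cases p a <;> cases q a <;> simp [Bool.or_comm]

theorem aScan_aux (s d : String) (m : List (String × String)) :
    ∀ (acc : List (String × String)) (c : Bool),
    m.foldl
      (fun st kv => if kv.2 == s then (st.1 ++ [(kv.1, d)], true) else (st.1 ++ [kv], st.2))
      (acc, c)
    = (acc ++ m.map (pvG s d), c || m.any (fun kv => kv.2 == s)) := by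
  induction m with
  | nil => intro acc c; simp
  | cons kv t ih =>
    intro acc c
    simp only [List.foldl_cons]
    by_cases h : kv.2 = s
    · have hb : (kv.2 == s) = true := by simpa using h
      rw [if_pos hb, ih]
      simp [pvG, hb]
    · have hb : (kv.2 == s) = false := by simpa using h
      rw [if_neg (by simp [hb]), ih]
      simp [pvG, hb]

theorem aScan_eq (m : List (String × String)) (c : Bool) (s d : String) :
    aScan m c s d = (m.map (pvG s d), c || m.any (fun kv => kv.2 == s)) := by
  unfold aScan
  exact aScan_aux s d m [] c

theorem aBody_eq (redirects : List (List (String × String))) :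
    ∀ (m : List (String × String)) (c : Bool),
    aBody redirects (m, c) =
      (m.map (fun kv => (kv.1, pvPass (pvEdges redirects) kv.2)),
       c || m.any (fun kv => ((pvEdges redirects).map Prod.fst).contains kv.2)) := by
  induction redirects with
  | nil => intro m c; simp [aBody, pvEdges, pvPass]
  | cons item rest ih =>
    intro m c
    have hstep : aBody (item :: rest) (m, c) =
        aBody rest (aScan m c (pvItemGet item "from") (pvItemGet item "to")) := rfl
    rw [hstep, aScan_eq, ih]
    refine Prod.ext ?_ ?_
    · show (m.map (pvG (pvItemGet item "from") (pvItemGet item "to"))).map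
        (fun kv => (kv.1, pvPass (pvEdges rest) kv.2)) = _
      rw [List.map_map]
      apply List.map_congr_left
      intro kv _
      simp only [Function.comp_apply, pvG, pvEdges, List.map_cons]
      by_cases h : kv.2 = pvItemGet item "from"
      · have hb : (kv.2 == pvItemGet item "from") = true := by simpa using h
        rw [if_pos (by simp [hb]), pvPass_cons]
        simp [hb]
      · have hb : (kv.2 == pvItemGet item "from") = false := by simpa using h
        rw [if_neg (by simp [hb]), pvPass_cons]
        simp [hb]
    · show ((c || m.any fun kv => kv.2 == pvItemGet item "from") ||
        (m.map (pvG (pvItemGet item "from") (pvItemGet item "to"))).any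
          (fun kv => ((pvEdges rest).map Prod.fst).contains kv.2)) = _
      rw [Bool.or_assoc]
      congr 1
      rw [List.any_map, pvAnyOr]
      refine PySem.List.any_congr_mem ?_
      intro kv _
      simp only [Function.comp_apply, pvG, pvEdges, List.map_cons, List.map_map,
        List.contains_cons]
      by_cases h : kv.2 = pvItemGet item "from" <;> simp [h]

theorem pvSetContains_true (l : List String) (v : String) (h : v ∈ l) :
    (PySem.Set.ofList l).contains v = true := by
  simp only [PySem.Set.contains_eq_listContains, List.contains_eq_mem, PySem.Set.mem_ofList]
  exact decide_eq_true h

theorem pvSetContains_false (l : List String) (v : String) (h : v ∉ l) :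
    (PySem.Set.ofList l).contains v = false := by
  simp only [PySem.Set.contains_eq_listContains, List.contains_eq_mem, PySem.Set.mem_ofList]
  exact decide_eq_false h

theorem bFollow_succ (edges : List (String × String)) (srcs : PySem.Set String)
    (n : Nat) (v : String) :
    bFollow edges srcs (n + 1) v =
      if srcs.contains v then bFollow edges srcs n (pvPass edges v) else v := rfl

theorem bFollow_escaped (edges : List (String × String)) (f : Nat) (v : String)
    (h : v ∉ edges.map Prod.fst) :
    bFollow edges (PySem.Set.ofList (edges.map Prod.fst)) f v = v := by
  cases f with
  | zero => rfl
  | succ n =>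
    rw [bFollow_succ, pvSetContains_false _ _ h]
    simp

theorem bFollow_congr (edges : List (String × String)) (k : Nat) :
    ∀ (f1 f2 : Nat) (v : String), k ≤ f1 → k ≤ f2 →
    (pvPass edges)^[k] v ∉ edges.map Prod.fst →
    bFollow edges (PySem.Set.ofList (edges.map Prod.fst)) f1 v =
      bFollow edges (PySem.Set.ofList (edges.map Prod.fst)) f2 v := by
  induction k with
  | zero =>
    intro f1 f2 v _ _ h
    simp only [Function.iterate_zero, id_eq] at h
    rw [bFollow_escaped edges f1 v h, bFollow_escaped edges f2 v h]
  | succ k ih =>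
    intro f1 f2 v h1 h2 h
    by_cases hv : v ∈ edges.map Prod.fst
    · obtain ⟨f1', rfl⟩ := Nat.exists_eq_add_of_le h1
      obtain ⟨f2', rfl⟩ := Nat.exists_eq_add_of_le h2
      have hs := pvSetContains_true _ _ hv
      have e1 : k + 1 + f1' = (k + f1') + 1 := by omega
      have e2 : k + 1 + f2' = (k + f2') + 1 := by omega
      rw [e1, e2, bFollow_succ, bFollow_succ, hs]
      simp only [if_true]
      apply ih _ _ _ (by omega) (by omega)
      rw [← Function.iterate_succ_apply]
      exact h
    · rw [bFollow_escaped edges f1 v hv, bFollow_escaped edges f2 v hv]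

theorem aLoop_eq (redirects : List (List (String × String))) (n : Nat) :
    ∀ (fuel : Nat) (m : List (String × String)), n < fuel →
    n ≤ (pvEdges redirects).length + 1 →
    (∀ kv ∈ m, (pvPass (pvEdges redirects))^[n] kv.2 ∉ (pvEdges redirects).map Prod.fst) →
    aLoop redirects fuel m =
      m.map (fun kv => (kv.1,
        bFollow (pvEdges redirects)
          (PySem.Set.ofList ((pvEdges redirects).map Prod.fst))
          ((pvEdges redirects).length + 1) kv.2)) := by
  induction n with
  | zero =>
    intro fuel m hf _ h
    obtain ⟨f, rfl⟩ : ∃ f, fuel = f + 1 := ⟨fuel - 1, by omega⟩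
    have h0 : ∀ kv ∈ m, kv.2 ∉ (pvEdges redirects).map Prod.fst := by
      intro kv hkv; simpa using h kv hkv
    have hflag : m.any (fun kv => ((pvEdges redirects).map Prod.fst).contains kv.2) = false := by
      rw [List.any_eq_false]
      intro kv hkv
      simp only [List.contains_eq_mem, decide_eq_true_eq]
      exact h0 kv hkv
    show (let st := aBody redirects (m, false);
          if st.2 then aLoop redirects f st.1 else st.1) = _
    rw [aBody_eq]
    simp only [hflag, Bool.or_false, Bool.false_eq_true, if_false]
    apply List.map_congr_left
    intro kv hkv
    rw [pvPass_escaped _ _ (h0 kv hkv), bFollow_escaped _ _ _ (h0 kv hkv)]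
  | succ n ih =>
    intro fuel m hf hn h
    obtain ⟨f, rfl⟩ : ∃ f, fuel = f + 1 := ⟨fuel - 1, by omega⟩
    show (let st := aBody redirects (m, false);
          if st.2 then aLoop redirects f st.1 else st.1) = _
    rw [aBody_eq]
    by_cases hflag :
        m.any (fun kv => ((pvEdges redirects).map Prod.fst).contains kv.2) = true
    · simp only [hflag, Bool.false_or, if_true]
      have hrec := ih f (m.map (fun kv => (kv.1, pvPass (pvEdges redirects) kv.2)))
        (by omega) (by omega)
        (by
          intro kv hkv
          simp only [List.mem_map] at hkv
          obtain ⟨p, hp, rfl⟩ := hkv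
          rw [← Function.iterate_succ_apply]
          exact h p hp)
      rw [hrec, List.map_map]
      apply List.map_congr_left
      intro kv hkv
      simp only [Function.comp_apply]
      by_cases hv : kv.2 ∈ (pvEdges redirects).map Prod.fst
      · have hs := pvSetContains_true _ _ hv
        have hunf : bFollow (pvEdges redirects)
            (PySem.Set.ofList ((pvEdges redirects).map Prod.fst))
            ((pvEdges redirects).length + 1) kv.2 =
            bFollow (pvEdges redirects)
              (PySem.Set.ofList ((pvEdges redirects).map Prod.fst))
              ((pvEdges redirects).length) (pvPass (pvEdges redirects) kv.2) := by
          rw [bFollow_succ, hs]; simp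
        rw [hunf]
        exact congrArg (fun x => (kv.1, x))
          (bFollow_congr (pvEdges redirects) n ((pvEdges redirects).length + 1)
            ((pvEdges redirects).length) (pvPass (pvEdges redirects) kv.2)
            (by omega) (by omega)
            (by rw [← Function.iterate_succ_apply]; exact h kv hkv))
      · rw [pvPass_escaped _ _ hv]
    · have hflag' :
          m.any (fun kv => ((pvEdges redirects).map Prod.fst).contains kv.2) = false := by
        simpa using hflag
      have h0 : ∀ kv ∈ m, kv.2 ∉ (pvEdges redirects).map Prod.fst := by
        have hall := List.any_eq_false.mp hflag'
        intro kv hkv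
        have := hall kv hkv
        simpa [List.contains_eq_mem] using this
      simp only [hflag', Bool.or_false, Bool.false_eq_true, if_false]
      apply List.map_congr_left
      intro kv hkv
      rw [pvPass_escaped _ _ (h0 kv hkv), bFollow_escaped _ _ _ (h0 kv hkv)]

theorem pvInitMap_nodup_keys (requested : List String)
    (normalized : List (List (String × String))) :
    (pvInitMap requested normalized).keys.Nodup := by
  unfold pvInitMap
  exact PySem.Dict.nodup_keys_foldl_insert_key normalized
    (fun item => pvItemGet item "from") (fun _ item => pvItemGet item "to") _
    (PySem.Dict.nodup_keys_foldl_insert requested (fun _ t => t) _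
      PySem.Dict.nodup_keys_empty)

theorem bCache_fold (F : String → String) :
    ∀ (l : List (String × String)) (cache out : PySem.Dict String String),
    (∀ v r, cache.get? v = some r → r = F v) →
    (out.keys ++ l.map Prod.fst).Nodup →
    ((l.foldl
      (fun (st : PySem.Dict String String × PySem.Dict String String) kv =>
        let c := if (st.1.get? kv.2).isSome then st.1 else st.1.insert kv.2 (F kv.2)
        (c, st.2.insert kv.1 (c.getD kv.2 "")))
      (cache, out)).2).items
    = out.items ++ l.map (fun kv => (kv.1, F kv.2)) := by
  intro l
  induction l with
  | nil => intro cache out _ _; simp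
  | cons kv t ih =>
    intro cache out hinv hnd
    simp only [List.foldl_cons]
    set c : PySem.Dict String String :=
      if (cache.get? kv.2).isSome then cache else cache.insert kv.2 (F kv.2) with hc
    have hcinv : ∀ v r, c.get? v = some r → r = F v := by
      intro v r hr
      rw [hc] at hr
      by_cases hs : (cache.get? kv.2).isSome
      · rw [if_pos hs] at hr; exact hinv v r hr
      · rw [if_neg hs, PySem.Dict.get?_insert] at hr
        by_cases hv : v = kv.2
        · rw [if_pos hv] at hr; cases hr; rw [hv]
        · rw [if_neg hv] at hr; exact hinv v r hr
    have hgetD : c.getD kv.2 "" = F kv.2 := by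
      rw [hc]
      by_cases hs : (cache.get? kv.2).isSome
      · rw [if_pos hs]
        obtain ⟨r, hr⟩ := Option.isSome_iff_exists.mp hs
        have h1 : cache.getD kv.2 "" = (cache.get? kv.2).getD "" :=
          PySem.Dict.getD_eq_get?_getD ..
        rw [h1, hr, Option.getD_some]
        exact hinv kv.2 r hr
      · rw [if_neg hs, PySem.Dict.getD_insert_self]
    have hnotmem : kv.1 ∉ out.keys := by
      intro hmem
      have := (List.nodup_append.mp hnd).2.2
      exact this kv.1 hmem kv.1 (by simp) rfl
    have hcont : out.contains kv.1 = false := by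
      rw [PySem.Dict.contains_eq_decide_mem_keys]
      exact decide_eq_false hnotmem
    have hitems : (out.insert kv.1 (c.getD kv.2 "")).items
        = out.items ++ [(kv.1, c.getD kv.2 "")] :=
      PySem.Dict.items_insert_of_not_contains _ _ hcont
    have hkeys : (out.insert kv.1 (c.getD kv.2 "")).keys = out.keys ++ [kv.1] := by
      show ((out.insert kv.1 (c.getD kv.2 "")).items).map _ = _
      rw [hitems]
      simp [PySem.Dict.keys]
    have hnd' : ((out.insert kv.1 (c.getD kv.2 "")).keys ++ t.map Prod.fst).Nodup := by
      rw [hkeys, List.append_assoc]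
      have hperm : (out.keys ++ ([kv.1] ++ t.map Prod.fst)).Perm
          (out.keys ++ (kv.1 :: t.map Prod.fst)) := by simp
      exact hperm.nodup_iff.mpr (by simpa using hnd)
    rw [ih c (out.insert kv.1 (c.getD kv.2 "")) hcinv hnd', hitems, hgetD]
    simp

theorem resolve_titles_py_main (requested_titles : List String)
    (query_obj : List (String × List (List (String × String))))
    (hpre : Pre_resolve_titles_py requested_titles query_obj) :
    resolve_titles_py requested_titles query_obj =
      resolve_titles_py_alt requested_titles query_obj := by
  obtain ⟨-, hterm⟩ := hpre
  have hmvals : ∀ kv ∈ (pvInitMap requested_titles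
        (((PySem.Dict.mk query_obj).get? "normalized").getD [])).items,
      (pvPass (pvEdges (((PySem.Dict.mk query_obj).get? "redirects").getD [])))^[(pvEdges (((PySem.Dict.mk query_obj).get? "redirects").getD [])).length + 1] kv.2
        ∉ (pvEdges (((PySem.Dict.mk query_obj).get? "redirects").getD [])).map Prod.fst := by
    intro kv hkv
    apply hterm
    exact List.mem_map_of_mem hkv
  have hlen : (pvEdges (((PySem.Dict.mk query_obj).get? "redirects").getD [])).length
      = (((PySem.Dict.mk query_obj).get? "redirects").getD []).length := by
    simp [pvEdges]
  have hA : resolve_titles_py requested_titles query_obj =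
      ((pvInitMap requested_titles (((PySem.Dict.mk query_obj).get? "normalized").getD [])).items).map
        (fun kv => (kv.1,
          bFollow (pvEdges (((PySem.Dict.mk query_obj).get? "redirects").getD []))
            (PySem.Set.ofList ((pvEdges (((PySem.Dict.mk query_obj).get? "redirects").getD [])).map Prod.fst))
            ((pvEdges (((PySem.Dict.mk query_obj).get? "redirects").getD [])).length + 1) kv.2)) := by
    show aLoop (((PySem.Dict.mk query_obj).get? "redirects").getD [])
      ((((PySem.Dict.mk query_obj).get? "redirects").getD []).length + 2) _ = _
    exact aLoop_eq _ ((pvEdges (((PySem.Dict.mk query_obj).get? "redirects").getD [])).length + 1)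
      _ _ (by omega) (by omega) hmvals
  have hnd : ((PySem.Dict.empty : PySem.Dict String String).keys ++
      ((pvInitMap requested_titles (((PySem.Dict.mk query_obj).get? "normalized").getD [])).items).map Prod.fst).Nodup := by
    have h1 := pvInitMap_nodup_keys requested_titles
      (((PySem.Dict.mk query_obj).get? "normalized").getD [])
    simpa [PySem.Dict.keys_empty, PySem.Dict.keys] using h1
  have hB : resolve_titles_py_alt requested_titles query_obj =
      ((pvInitMap requested_titles (((PySem.Dict.mk query_obj).get? "normalized").getD [])).items).map
        (fun kv => (kv.1,
          bFollow (pvEdges (((PySem.Dict.mk query_obj).get? "redirects").getD []))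
            (PySem.Set.ofList ((pvEdges (((PySem.Dict.mk query_obj).get? "redirects").getD [])).map Prod.fst))
            ((pvEdges (((PySem.Dict.mk query_obj).get? "redirects").getD [])).length + 1) kv.2)) := by
    have hfold := bCache_fold
      (fun v => bFollow (pvEdges (((PySem.Dict.mk query_obj).get? "redirects").getD []))
        (PySem.Set.ofList ((pvEdges (((PySem.Dict.mk query_obj).get? "redirects").getD [])).map Prod.fst))
        ((pvEdges (((PySem.Dict.mk query_obj).get? "redirects").getD [])).length + 1) v)
      ((pvInitMap requested_titles (((PySem.Dict.mk query_obj).get? "normalized").getD [])).items)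
      PySem.Dict.empty PySem.Dict.empty
      (by intro v r hr; rw [PySem.Dict.get?_empty] at hr; cases hr) hnd
    show ((((pvInitMap requested_titles (((PySem.Dict.mk query_obj).get? "normalized").getD [])).items).foldl
      _ (PySem.Dict.empty, PySem.Dict.empty)).2).items = _
    rw [hfold]
    have : (PySem.Dict.empty : PySem.Dict String String).items = [] := rfl
    rw [this, List.nil_append]
  rw [hA, hB]

-- ===== VERDICT (by name: the statement is the Claim_ definition above) =====
theorem resolve_titles_py_spec : Claim_equal_resolve_titles_py := by
  intro requested_titles query_obj _ hpre
  exact resolve_titles_py_main requested_titles query_obj hpre
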